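-- pv_equiv track=rewrite | github.com/benjaminrall/advent-of-code-2021 | day10/part1.py | start_chunk
-- ===== SOURCE A (Python) =====
-- closing = {'(':')', '[':']', '{':'}', '<':'>'}
--
-- def start_chunk(chunk, i, opening):
--     if opening not in closing:
--         return (False, opening), i
--     i += 1
--     while i < len(chunk) - 1 and chunk[i] in closing:
--         returnExpression, i = start_chunk(chunk, i, chunk[i])
--         if not returnExpression[0]:
--             return returnExpression, i
--         i += 1
--     if i >= len(chunk):
--         return (True, None), i
--     if chunk[i] == closing[opening]:
--         return (True, None), i
--     if i < len(chunk):
--         return (False, chunk[i]), i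
--     return (True, None), i
-- ===== SOURCE B (Python) =====
-- closing = {'(':')', '[':']', '{':'}', '<':'>'}
--
-- def start_chunk(chunk, i, opening):
--     if opening not in closing:
--         return (False, opening), i
--     n = len(chunk)
--     stack = [opening]
--     i += 1
--     while True:
--         if i >= n:
--             return (True, None), i + len(stack) - 1
--         c = chunk[i]
--         if i < n - 1 and c in closing:
--             stack.append(c)
--             i += 1
--         elif c == closing[stack[-1]]:
--             stack.pop()
--             i += 1
--             if not stack:
--                 return (True, None), i - 1
--         else:
--             return (False, c), i
-- ===== Notes on version B (the rewrite author's own statement) =====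
-- stated objective: alternative
-- what changed: A parses nested brackets by recursing (one Python call frame per nesting level, threading the index through the recursive returns); B is a single iterative while-loop over the string with an explicit stack of pending openers, recovering A's returned index from the position and the remaining stack height.
import Mathlib
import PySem

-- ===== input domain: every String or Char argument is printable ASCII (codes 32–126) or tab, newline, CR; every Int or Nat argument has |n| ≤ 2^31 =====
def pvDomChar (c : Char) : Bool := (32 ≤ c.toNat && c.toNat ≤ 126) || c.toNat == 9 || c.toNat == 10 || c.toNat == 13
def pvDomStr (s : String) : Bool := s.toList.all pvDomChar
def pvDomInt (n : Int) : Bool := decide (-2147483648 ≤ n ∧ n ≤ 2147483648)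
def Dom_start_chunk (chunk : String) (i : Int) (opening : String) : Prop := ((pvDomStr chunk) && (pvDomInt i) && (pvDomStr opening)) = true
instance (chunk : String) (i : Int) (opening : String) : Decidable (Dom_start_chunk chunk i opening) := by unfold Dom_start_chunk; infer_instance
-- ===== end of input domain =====

-- B replaces A's recursion (one call level per nested bracket) by a single iterative
-- scan with an explicit stack of pending openers; objective: alternative decomposition.

-- ===== PORT A =====

-- the module-level dict `closing`
def pyClosing : PySem.Dict String String :=
  PySem.Dict.ofList [("(", ")"), ("[", "]"), ("{", "}"), ("<", ">")]

-- A's terminal returns after the while loop (chunk[i] already fetched as c, i < len):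
-- `closing[opening]` is read with getD; the default is never used because A reaches this
-- point only with `opening in closing` already checked at function entry.
def aPost (opening : String) (i : Int) (c : String) : (Bool × Option String) × Int :=
  if c = pyClosing.getD opening "" then ((true, none), i)
  else ((false, some c), i)

theorem aPost_snd (opening : String) (i : Int) (c : String) : (aPost opening i c).2 = i := by
  unfold aPost; split <;> rfl

-- A's while loop, state = i.  A's recursive call `start_chunk(chunk, i, chunk[i])` is made
-- with `chunk[i] in closing` just established by the loop guard, so its entry guard does
-- not fire and its body is again this loop started at i+1 — that call is transcribed as
-- the inner `startLoop chunk (String.ofList [ch]) (i+1)`.  The subtype bound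
-- `i ≤ result index` (true of every return of A's loop) is carried only for termination.
def startLoop (chunk : List Char) (opening : String) (i : Int) :
    {r : (Bool × Option String) × Int // i ≤ r.2} :=
  if hlt : i < PySem.List.len chunk - 1 then
    match PySem.List.pyGet? chunk i with
    | none => ⟨((false, none), i), le_refl _⟩  -- Python raises IndexError here (outside Pre_)
    | some ch =>
      if pyClosing.contains (String.ofList [ch]) then
        match startLoop chunk (String.ofList [ch]) (i + 1) with
        | ⟨rv, hrv⟩ =>
          if rv.1.1 = false then ⟨rv, by omega⟩
          else
            match startLoop chunk opening (rv.2 + 1) with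
            | ⟨rv2, hrv2⟩ => ⟨rv2, by omega⟩
      else ⟨aPost opening i (String.ofList [ch]), by rw [aPost_snd]⟩
  else
    if i ≥ PySem.List.len chunk then ⟨((true, none), i), le_refl _⟩
    else
      match PySem.List.pyGet? chunk i with
      | none => ⟨((false, none), i), le_refl _⟩  -- Python raises IndexError here (outside Pre_)
      | some ch => ⟨aPost opening i (String.ofList [ch]), by rw [aPost_snd]⟩
termination_by (PySem.List.len chunk - i).toNat
decreasing_by
  all_goals simp only [PySem.List.len_eq] at *; omega

def start_chunk (chunk : String) (i : Int) (opening : String) : (Bool × Option String) × Int :=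
  if pyClosing.contains opening = false then ((false, some opening), i)
  else (startLoop chunk.toList opening (i + 1)).val

-- ===== PORT B =====

-- B's single `while True` loop; the Python list used as a stack (append/pop at the end,
-- stack[-1] the top) is represented with its TOP AT THE HEAD of the Lean list.
def altLoop (chunk : List Char) (stack : List String) (i : Int) : (Bool × Option String) × Int :=
  if i ≥ PySem.List.len chunk then ((true, none), i + stack.length - 1)
  else
    match PySem.List.pyGet? chunk i with
    | none => ((false, none), i)  -- Python raises IndexError here (outside Pre_)
    | some ch =>
      let c := String.ofList [ch]
      if i < PySem.List.len chunk - 1 ∧ pyClosing.contains c then altLoop chunk (c :: stack) (i + 1)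
      else
        match stack with
        | [] => ((false, none), i)  -- unreachable: the loop returns as soon as the stack empties
        | top :: rest =>
          if c = pyClosing.getD top "" then
            if rest.isEmpty then ((true, none), (i + 1) - 1)
            else altLoop chunk rest (i + 1)
          else ((false, some c), i)
termination_by (PySem.List.len chunk - i).toNat
decreasing_by
  all_goals simp only [PySem.List.len_eq] at *; omega

def start_chunk_alt (chunk : String) (i : Int) (opening : String) : (Bool × Option String) × Int :=
  if pyClosing.contains opening = false then ((false, some opening), i)
  else altLoop chunk.toList [opening] (i + 1)

-- ===== PRECONDITION & SPEC =====
-- Pre_ excludes exactly the inputs on which A raises IndexError: an opener `opening`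
-- together with a start position i with i+1 < -len(chunk) (the first index A reads is then
-- out of range).  B raises there too.
def Pre_start_chunk (chunk : String) (i : Int) (opening : String) : Prop :=
  pyClosing.contains opening = true → -(PySem.Str.len chunk) ≤ i + 1
instance (chunk : String) (i : Int) (opening : String) : Decidable (Pre_start_chunk chunk i opening) := by unfold Pre_start_chunk; infer_instance

def pvWitness_start_chunk : String × Int × String := ("([])", -1, "(")

def Spec_start_chunk (chunk : String) (i : Int) (opening : String) (out : (Bool × Option String) × Int) : Prop := out = start_chunk_alt chunk i opening
instance (chunk : String) (i : Int) (opening : String) (out : (Bool × Option String) × Int) : Decidable (Spec_start_chunk chunk i opening out) := by unfold Spec_start_chunk; infer_instance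

-- ===== CLAIM (what is proved, stated in full; the proofs are below) =====
def Claim_equal_start_chunk : Prop := ∀ (chunk : String) (i : Int) (opening : String), Dom_start_chunk chunk i opening → Pre_start_chunk chunk i opening → Spec_start_chunk chunk i opening (start_chunk chunk i opening)

-- ===== LEMMAS AND PROOFS =====

-- step lemmas for the two loops ------------------------------------------------------

theorem altLoop_ge (chunk : List Char) (stack : List String) (i : Int)
    (h : PySem.List.len chunk ≤ i) :
    altLoop chunk stack i = ((true, none), i + stack.length - 1) := by
  rw [altLoop, if_pos (by omega)]

theorem altLoop_push (chunk : List Char) (stack : List String) (i : Int) (ch : Char)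
    (hch : PySem.List.pyGet? chunk i = some ch)
    (hop : i < PySem.List.len chunk - 1 ∧ pyClosing.contains (String.ofList [ch]) = true) :
    altLoop chunk stack i = altLoop chunk (String.ofList [ch] :: stack) (i + 1) := by
  rw [altLoop, if_neg (by simp only [PySem.List.len_eq] at hop ⊢; omega), hch]
  simp only
  rw [if_pos hop]

theorem altLoop_nopush (chunk : List Char) (top : String) (rest : List String) (i : Int) (ch : Char)
    (hch : PySem.List.pyGet? chunk i = some ch)
    (hlt : i < PySem.List.len chunk)
    (hop : ¬(i < PySem.List.len chunk - 1 ∧ pyClosing.contains (String.ofList [ch]) = true)) :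
    altLoop chunk (top :: rest) i =
      (if String.ofList [ch] = pyClosing.getD top "" then
        (if rest.isEmpty then ((true, none), (i + 1) - 1)
         else altLoop chunk rest (i + 1))
       else ((false, some (String.ofList [ch])), i)) := by
  rw [altLoop, if_neg (by simp only [PySem.List.len_eq] at hlt ⊢; omega), hch]
  simp only
  rw [if_neg hop]

theorem startLoop_ge (chunk : List Char) (top : String) (i : Int)
    (h : PySem.List.len chunk ≤ i) :
    (startLoop chunk top i).val = ((true, none), i) := by
  rw [startLoop]
  simp only [PySem.List.len_eq] at h ⊢
  rw [dif_neg (by omega), if_pos (by omega)]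

-- A's loop when its guard fires: the inlined recursive call, then propagate or resume
theorem startLoop_rec (chunk : List Char) (top : String) (i : Int) (ch : Char)
    (hch : PySem.List.pyGet? chunk i = some ch)
    (hop : i < PySem.List.len chunk - 1 ∧ pyClosing.contains (String.ofList [ch]) = true) :
    (startLoop chunk top i).val =
      (if (startLoop chunk (String.ofList [ch]) (i + 1)).val.1.1 = false then
        (startLoop chunk (String.ofList [ch]) (i + 1)).val
       else (startLoop chunk top ((startLoop chunk (String.ofList [ch]) (i + 1)).val.2 + 1)).val) := by
  rw [startLoop, dif_pos hop.1, hch]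
  simp only [hop.2, if_true]
  obtain ⟨rv, hrv⟩ := startLoop chunk (String.ofList [ch]) (i + 1)
  by_cases hb : rv.1.1 = false <;> simp [hb]

-- A's loop when its guard fails at an in-range i: it falls through to the terminal tests
theorem startLoop_guard_false (chunk : List Char) (top : String) (i : Int) (ch : Char)
    (hch : PySem.List.pyGet? chunk i = some ch)
    (hlt : i < PySem.List.len chunk)
    (hop : ¬(i < PySem.List.len chunk - 1 ∧ pyClosing.contains (String.ofList [ch]) = true)) :
    (startLoop chunk top i).val = aPost top i (String.ofList [ch]) := by
  simp only [PySem.List.len_eq] at hlt hop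
  rw [startLoop]
  simp only [PySem.List.len_eq]
  by_cases h : i < (chunk.length : Int) - 1
  · rw [dif_pos h, hch]
    simp only
    rw [if_neg (by intro hc; exact hop ⟨h, hc⟩)]
  · rw [dif_neg h, if_neg (by omega), hch]

-- The continuation of A's suspended enclosing loop levels: after an inner level returns r,
-- each enclosing level (opener o) either propagates a failure or resumes its loop at r.2+1.
def contA (chunk : List Char) : ((Bool × Option String) × Int) → List String → ((Bool × Option String) × Int)
  | r, [] => r
  | r, o :: rest =>
      if r.1.1 = false then r
      else contA chunk (startLoop chunk o (r.2 + 1)).val rest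

theorem contA_false (chunk : List Char) (x : Option String) (j : Int) (rest : List String) :
    contA chunk ((false, x), j) rest = ((false, x), j) := by
  cases rest <;> simp [contA]

theorem contA_end (chunk : List Char) (rest : List String) :
    ∀ (j : Int), PySem.List.len chunk ≤ j →
      contA chunk ((true, none), j) rest = ((true, none), j + rest.length) := by
  induction rest with
  | nil => intro j _; simp [contA]
  | cons o rest ih =>
      intro j hj
      simp only [PySem.List.len_eq] at hj
      rw [contA, if_neg (by simp)]
      rw [startLoop_ge chunk o (j + 1) (by simp only [PySem.List.len_eq]; omega)]
      rw [ih (j + 1) (by simp only [PySem.List.len_eq]; omega)]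
      simp only [List.length_cons]
      push_cast
      ring_nf

theorem altLoop_eq_contA (chunk : List Char) :
    ∀ (k : Nat) (i : Int) (top : String) (rest : List String),
      (PySem.List.len chunk - i).toNat ≤ k → -(PySem.List.len chunk) ≤ i →
      altLoop chunk (top :: rest) i = contA chunk (startLoop chunk top i).val rest := by
  have hcase_ge : ∀ (i : Int) (top : String) (rest : List String),
      PySem.List.len chunk ≤ i →
      altLoop chunk (top :: rest) i = contA chunk (startLoop chunk top i).val rest := by
    intro i top rest hge
    rw [altLoop_ge chunk (top :: rest) i hge, startLoop_ge chunk top i hge,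
      contA_end chunk rest i hge]
    simp only [List.length_cons]
    push_cast
    ring_nf
  intro k
  induction k with
  | zero =>
      intro i top rest hk hlo
      simp only [PySem.List.len_eq] at hk hlo
      exact hcase_ge i top rest (by simp only [PySem.List.len_eq]; omega)
  | succ k ih =>
      intro i top rest hk hlo
      by_cases hge : PySem.List.len chunk ≤ i
      · exact hcase_ge i top rest hge
      · -- i < n: chunk[i] is defined
        simp only [PySem.List.len_eq] at hge
        have hrange : PySem.Raise.InRange chunk.length i := by
          constructor <;> simp only [PySem.List.len_eq] at hlo ⊢ <;> omega
        obtain ⟨ch, hch⟩ : ∃ ch, PySem.List.pyGet? chunk i = some ch := by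
          cases hg : PySem.List.pyGet? chunk i with
          | none => exact absurd hrange ((PySem.List.pyGet?_eq_none_iff _ _).mp hg)
          | some c => exact ⟨c, rfl⟩
        have hk' : (PySem.List.len chunk - (i + 1)).toNat ≤ k := by
          simp only [PySem.List.len_eq] at hk ⊢; omega
        have hlo' : -(PySem.List.len chunk) ≤ i + 1 := by
          simp only [PySem.List.len_eq] at hlo ⊢; omega
        by_cases hop : i < PySem.List.len chunk - 1 ∧ pyClosing.contains (String.ofList [ch]) = true
        · -- chunk[i] is an opener strictly before the last position: A recurses, B pushes
          rw [altLoop_push chunk (top :: rest) i ch hch hop,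
            ih (i + 1) (String.ofList [ch]) (top :: rest) hk' hlo',
            startLoop_rec chunk top i ch hch hop, contA]
          by_cases hfail : (startLoop chunk (String.ofList [ch]) (i + 1)).val.1.1 = false
          · rw [if_pos hfail, if_pos hfail]
            rcases hR : (startLoop chunk (String.ofList [ch]) (i + 1)).val with ⟨⟨b, x⟩, j⟩
            rw [hR] at hfail
            simp only at hfail
            subst hfail
            exact (contA_false chunk x j rest).symm
          · rw [if_neg hfail, if_neg hfail]
        · -- loop guard fails: A falls through to its terminal tests, B matches the stack top
          have hltn : i < PySem.List.len chunk := by simp only [PySem.List.len_eq]; omega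
          rw [altLoop_nopush chunk top rest i ch hch hltn hop,
            startLoop_guard_false chunk top i ch hch hltn hop]
          unfold aPost
          by_cases hcl : String.ofList [ch] = pyClosing.getD top ""
          · rw [if_pos hcl, if_pos hcl]
            cases rest with
            | nil =>
                rw [if_pos (by simp)]
                show ((true, none), i + 1 - 1) = contA chunk ((true, none), i) []
                simp only [contA]
                congr 1
                omega
            | cons o rest' =>
                rw [if_neg (by simp), ih (i + 1) o rest' hk' hlo', contA, if_neg (by simp)]
          · rw [if_neg hcl, if_neg hcl]
            exact (contA_false chunk (some (String.ofList [ch])) i rest).symm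

-- ===== VERDICT (by name: the statement is the Claim_ definition above) =====
theorem start_chunk_spec : Claim_equal_start_chunk := by
  intro chunk i opening _ hpre
  unfold Spec_start_chunk start_chunk start_chunk_alt
  by_cases hop : pyClosing.contains opening = false
  · rw [if_pos hop, if_pos hop]
  · rw [if_neg hop, if_neg hop]
    have hlo : -(PySem.List.len chunk.toList) ≤ i + 1 := by
      have := hpre (by revert hop; cases pyClosing.contains opening <;> simp)
      simp only [PySem.Str.len_eq, PySem.List.len_eq] at this ⊢
      omega
    rw [altLoop_eq_contA chunk.toList (PySem.List.len chunk.toList - (i + 1)).toNat (i + 1) opening [] (le_refl _) hlo]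
    rfl
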